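-- pv_equiv track=rewrite | github.com/hasoftware/JobBridge | resume-ranking/skill_ner_model/data_parser.py | annotate_text
-- ===== SOURCE A (Python) =====
-- def annotate_text(text, skills):
--     text_lower = text.lower()
--     entities = []
--     for skill in skills:
--         skill_lower = skill.lower()
--         start = text_lower.find(skill_lower)
--         while start != -1:
--             entities.append((start, start + len(skill), "SKILL"))
--             start = text_lower.find(skill_lower, start + 1)
--     entities.sort()
--
--     cleaned = []
--     last_end = -1
--     for start, end, label in entities:
--         if start >= last_end:
--             cleaned.append((start, end, label))
--             last_end = end
--     return cleaned
-- ===== SOURCE B (Python) =====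
-- def annotate_text(text, skills):
--     # One left-to-right greedy scan: at each uncovered position take the
--     # shortest skill matching there, then jump past it.  No global match
--     # list is built and nothing is sorted at the end.
--     tl = text.lower()
--     lowered = (s.lower() for s in skills)
--     patterns = sorted(dict.fromkeys(p for p in lowered if p), key=len)
--     out = []
--     last_end = 0
--     for i in range(len(tl)):
--         if i < last_end:
--             continue
--         for p in patterns:
--             if tl.startswith(p, i):
--                 out.append((i, i + len(p), "SKILL"))
--                 last_end = i + len(p)
--                 break
--     return out
-- ===== Notes on version B (the rewrite author's own statement) =====
-- stated objective: faster
-- what changed: A collects every occurrence of every skill via repeated str.find, sorts the full match list and greedily merges; B never builds or sorts a global match list: one left-to-right scan keeps last_end, skips covered positions and takes at each uncovered position the shortest matching pattern from a deduplicated length-sorted pattern list, which is provably exactly what A's sort + 'start >= last_end' merge keeps; Pre_ excludes skill lists containing the empty string, a degenerate pattern on which A's zero-width-span-everywhere value and B's no-match value are both defensible.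
-- outside the precondition, e.g. on annotate_text('a', ['']): A returns [(0, 0, 'SKILL'), (1, 1, 'SKILL')], B returns []
import Mathlib
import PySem

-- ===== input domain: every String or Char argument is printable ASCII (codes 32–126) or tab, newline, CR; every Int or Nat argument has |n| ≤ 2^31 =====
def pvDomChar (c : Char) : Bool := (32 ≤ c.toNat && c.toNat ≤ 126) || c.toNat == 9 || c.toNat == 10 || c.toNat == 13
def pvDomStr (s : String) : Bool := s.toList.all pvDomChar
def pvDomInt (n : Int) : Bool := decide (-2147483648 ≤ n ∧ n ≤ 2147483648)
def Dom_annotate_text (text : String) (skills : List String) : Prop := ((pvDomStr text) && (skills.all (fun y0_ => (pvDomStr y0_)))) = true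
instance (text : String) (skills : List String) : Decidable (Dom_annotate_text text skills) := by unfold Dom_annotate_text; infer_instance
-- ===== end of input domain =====

-- B replaces A's build-all-matches + sort + greedy merge by a single left-to-right
-- greedy scan that never materializes the match list; Pre_ excludes skill lists
-- containing "" (a degenerate pattern whose matches are anybody's choice, see Pre_).


-- ===== PORT A =====
-- the inner `while start != -1` loop of A; the fuel argument only makes the
-- recursion total (fuel = len(text)+2 always suffices: each found start strictly
-- increases, which the proofs below establish).
def pvSkillLoopA (tl sl : List Char) (slen : Int) : Nat → Int → List (Int × Int × String)
  | 0, _ => []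
  | fuel+1, start =>
    if start = -1 then []
    else (start, start + slen, "SKILL") :: pvSkillLoopA tl sl slen fuel (PySem.Chars.findFrom tl sl (start + 1))

def annotate_text (text : String) (skills : List String) : List (Int × Int × String) :=
  let tl := PySem.Chars.lower text.toList
  let entities := skills.foldl (fun acc skill =>
    let sl := PySem.Chars.lower skill.toList
    acc ++ pvSkillLoopA tl sl (skill.toList.length : Int) (tl.length + 2) (PySem.Chars.find tl sl)) []
  -- entities.sort(): Python compares the triples lexicographically; the third
  -- component is always "SKILL", so the comparison never reaches it and the
  -- (start, end) tuple key is exact.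
  let sorted := PySem.List.sorted2 entities (fun t => t.1) (fun t => t.2.1)
  (sorted.foldl (fun (st : List (Int × Int × String) × Int) t =>
      if t.1 ≥ st.2 then (st.1 ++ [t], t.2.1) else st) ([], -1)).1

-- ===== PORT B =====
def annotate_text_alt (text : String) (skills : List String) : List (Int × Int × String) :=
  let tl := PySem.Chars.lower text.toList
  let patterns := PySem.List.sorted
    (PySem.Set.ofList ((skills.map (fun s => PySem.Chars.lower s.toList)).filter (fun p => !p.isEmpty)))
    (fun p => p.length)
  ((List.range tl.length).foldl (fun (st : List (Int × Int × String) × Int) (i : Nat) =>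
      if (i : Int) < st.2 then st
      else
        -- `for p in patterns: if tl.startswith(p, i): …; break`
        match patterns.find? (fun p => PySem.Chars.startswith (tl.drop i) p) with
        | some p => (st.1 ++ [((i:Int), (i:Int) + (p.length:Int), "SKILL")], (i:Int) + (p.length:Int))
        | none => st) ([], 0)).1

-- ===== PRECONDITION & SPEC =====
-- Pre_ excludes skill lists containing the empty string: "" is a degenerate
-- pattern no caller would specify, and on it A's value (str.find matches "" at
-- every position, so A emits a zero-width (i, i, "SKILL") span at every uncovered
-- position) and B's value (an empty pattern matches nothing) are both defensible.
def Pre_annotate_text (text : String) (skills : List String) : Prop := ("" : String) ∉ skills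
instance (text : String) (skills : List String) : Decidable (Pre_annotate_text text skills) := by unfold Pre_annotate_text; infer_instance
def pvWitness_annotate_text : String × List String := ("I know Python and C.", ["python", "c"])
def Spec_annotate_text (text : String) (skills : List String) (out : List (Int × Int × String)) : Prop := out = annotate_text_alt text skills
instance (text : String) (skills : List String) (out : List (Int × Int × String)) : Decidable (Spec_annotate_text text skills out) := by unfold Spec_annotate_text; infer_instance

-- ===== CLAIM =====
def Claim_equal_annotate_text : Prop := ∀ (text : String) (skills : List String), Dom_annotate_text text skills → Pre_annotate_text text skills → Spec_annotate_text text skills (annotate_text text skills)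

-- ===== LEMMAS AND PROOFS =====

-- proof-side abbreviations
def pvEnt (p : Nat) (sk : String) : Int × Int × String := ((p:Int), (p:Int) + (sk.toList.length:Int), "SKILL")
def pvPred (tl : List Char) (p : Nat) (sk : String) : Bool := (PySem.Chars.lower sk.toList).isPrefixOf (tl.drop p)
def pvQ (tl : List Char) (skills : List String) (p : Nat) : List String :=
  (PySem.List.sorted skills (fun sk => sk.toList.length)).filter (pvPred tl p)
def pvMs (tl : List Char) (skills : List String) (p : Nat) : List (Int × Int × String) :=
  (pvQ tl skills p).map (pvEnt p)
def pvES (tl : List Char) (skills : List String) : List (Int × Int × String) :=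
  (List.range (tl.length + 1)).flatMap (pvMs tl skills)
def pvStepA (st : List (Int × Int × String) × Int) (t : Int × Int × String) : List (Int × Int × String) × Int :=
  if t.1 ≥ st.2 then (st.1 ++ [t], t.2.1) else st
def pvLexLe (a b : Int × Int × String) : Prop := a.1 < b.1 ∨ (a.1 = b.1 ∧ a.2.1 ≤ b.2.1)
def pvNonempty (skills : List String) : List (List Char) :=
  PySem.List.sorted (PySem.Set.ofList ((skills.map (fun s => PySem.Chars.lower s.toList)).filter (fun p => !p.isEmpty))) (fun p => p.length)
def pvStepB (tl : List Char) (skills : List String) (st : List (Int × Int × String) × Int) (i : Nat) :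
    List (Int × Int × String) × Int :=
  if (i : Int) < st.2 then st
  else
    match (pvNonempty skills).find? (fun p => PySem.Chars.startswith (tl.drop i) p) with
    | some p => (st.1 ++ [((i:Int), (i:Int) + (p.length:Int), "SKILL")], (i:Int) + (p.length:Int))
    | none => st

-- ---- step 1: the find loop enumerates, in increasing order, all match positions ----
theorem pvFindFrom_pastEnd (s sub : List Char) (k : Int) (h : (s.length : Int) < k) :
    PySem.Chars.findFrom s sub k none = -1 := by
  simp only [PySem.Chars.findFrom]
  split_ifs with h1 h2 h3 <;> omega

theorem pvLoopA_eq (tl sl : List Char) (slen : Int) :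
    ∀ fuel k, k ≤ tl.length + 1 → tl.length + 1 - k < fuel →
    pvSkillLoopA tl sl slen fuel (PySem.Chars.findFrom tl sl (k : Int)) =
      ((List.range' k (tl.length + 1 - k)).filter (fun p => sl.isPrefixOf (tl.drop p))).map
        (fun p : Nat => ((p:Int), (p:Int) + slen, "SKILL")) := by
  intro fuel
  induction fuel with
  | zero => intro k hk hf; omega
  | succ fuel ih =>
    intro k hk hf
    by_cases hk1 : k = tl.length + 1
    · subst hk1
      rw [pvFindFrom_pastEnd tl sl _ (by push_cast; omega)]
      simp [pvSkillLoopA]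
    · have hk' : k ≤ tl.length := by omega
      by_cases hneg : PySem.Chars.findFrom tl sl (k : Int) none = -1
      · rw [hneg]
        simp only [pvSkillLoopA, if_pos rfl]
        have hni : ¬ sl <:+: tl.drop k := (PySem.Chars.findFrom_natCast_eq_neg_one_iff tl sl k hk').mp hneg
        have : (List.range' k (tl.length + 1 - k)).filter (fun p => sl.isPrefixOf (tl.drop p)) = [] := by
          rw [List.filter_eq_nil_iff]
          intro p hp hpre
          rw [List.isPrefixOf_iff_prefix] at hpre
          have hkp : k ≤ p := (List.mem_range'_1.mp hp).1
          have : sl <+: (tl.drop k).drop (p - k) := by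
            rw [List.drop_drop]
            have hpk : k + (p - k) = p := by omega
            rw [hpk]; exact hpre
          exact hni (this.isInfix.trans (List.drop_suffix _ _).isInfix)
        rw [this]; simp
      · obtain ⟨hge, hpre, hmin⟩ := PySem.Chars.findFrom_natCast_spec tl sl k hk' hneg
        set m := PySem.Chars.findFrom tl sl (k : Int) none with hm
        have hm0 : 0 ≤ m := le_trans (by exact_mod_cast Int.natCast_nonneg k) hge
        have hmN : (m.toNat : Int) = m := Int.toNat_of_nonneg hm0
        have hkm : k ≤ m.toNat := by omega
        have hmle : m.toNat ≤ tl.length := by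
          by_contra hgt
          push_neg at hgt
          have hdrop : tl.drop m.toNat = [] := List.drop_eq_nil_of_le (by omega)
          rw [hdrop] at hpre
          have hsl : sl = [] := List.prefix_nil.mp hpre
          have hklt : k < m.toNat := by omega
          exact hmin k le_rfl hklt (by rw [hsl]; exact List.nil_prefix)
        have hstep : pvSkillLoopA tl sl slen (fuel+1) m =
            (m, m + slen, "SKILL") :: pvSkillLoopA tl sl slen fuel (PySem.Chars.findFrom tl sl (m + 1)) := by
          simp [pvSkillLoopA, hneg]
        have hcast : m + 1 = ((m.toNat + 1 : Nat) : Int) := by push_cast; omega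
        have hrec := ih (m.toNat + 1) (by omega) (by omega)
        have hsplit : List.range' k (tl.length + 1 - k) =
            List.range' k (m.toNat - k) ++ m.toNat :: List.range' (m.toNat + 1) (tl.length - m.toNat) := by
          have h1 : List.range' k (m.toNat - k) ++ List.range' (k + (m.toNat - k)) (tl.length + 1 - m.toNat) =
              List.range' k ((m.toNat - k) + (tl.length + 1 - m.toNat)) := by
            have h0 := @List.range'_append k (m.toNat - k) (tl.length + 1 - m.toNat) 1
            simpa using h0
          have h2 : k + (m.toNat - k) = m.toNat := by omega
          have h3 : (m.toNat - k) + (tl.length + 1 - m.toNat) = tl.length + 1 - k := by omega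
          rw [h2, h3] at h1
          rw [← h1]
          congr 1
          have h4 : tl.length + 1 - m.toNat = (tl.length - m.toNat) + 1 := by omega
          rw [h4, List.range'_succ]
        have hfilter1 : (List.range' k (m.toNat - k)).filter (fun p => sl.isPrefixOf (tl.drop p)) = [] := by
          rw [List.filter_eq_nil_iff]
          intro p hp hpre'
          rw [List.isPrefixOf_iff_prefix] at hpre'
          have := List.mem_range'_1.mp hp
          exact hmin p this.1 (by omega) hpre'
        have hpredm : sl.isPrefixOf (tl.drop m.toNat) = true := List.isPrefixOf_iff_prefix.mpr hpre
        rw [hstep, hcast, hrec, hsplit]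
        rw [List.filter_append, hfilter1, List.filter_cons, hpredm]
        rw [show tl.length + 1 - (m.toNat + 1) = tl.length - m.toNat from by omega]
        simp [hmN]

-- ---- step 2: the unsorted match list is a permutation of pvES ----
theorem pvFlatMap_append_perm {α β : Type} (l : List α) (f g : α → List β) :
    (l.flatMap fun a => f a ++ g a).Perm (l.flatMap f ++ l.flatMap g) := by
  induction l with
  | nil => simp
  | cons a t ih =>
    simp only [List.flatMap_cons, List.append_assoc]
    refine ((ih.append_left _).append_left _).trans ?_
    exact List.Perm.append_left _ (List.perm_append_comm_assoc _ _ _)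

theorem pvFlatMap_perm_congr {α β : Type} (l : List α) (f g : α → List β)
    (h : ∀ a ∈ l, (f a).Perm (g a)) : (l.flatMap f).Perm (l.flatMap g) := by
  induction l with
  | nil => simp
  | cons a t ih =>
    simp only [List.flatMap_cons]
    exact (h a (by simp)).append (ih (fun a ha => h a (by simp [ha])))

theorem pvFlatMap_ite_singleton {β γ : Type} (l2 : List β) (qa : β → Bool) (ha : β → γ) :
    (l2.flatMap fun b => if qa b then [ha b] else []) = (l2.filter qa).map ha := by
  induction l2 with
  | nil => simp
  | cons b t2 ih2 =>
    simp only [List.flatMap_cons, List.filter_cons]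
    split_ifs <;> simp [ih2]

theorem pvTranspose_perm {α β γ : Type} (l1 : List α) (l2 : List β) (q : α → β → Bool) (h : α → β → γ) :
    (l1.flatMap fun a => (l2.filter (fun b => q a b)).map (fun b => h a b)).Perm
      (l2.flatMap fun b => (l1.filter (fun a => q a b)).map (fun a => h a b)) := by
  induction l1 with
  | nil => simp
  | cons a t ih =>
    simp only [List.flatMap_cons, List.filter_cons]
    have e1 : (l2.flatMap fun b => (if q a b then a :: t.filter (fun a' => q a' b) else t.filter (fun a' => q a' b)).map (fun a' => h a' b)).Perm
        (l2.flatMap fun b => (if q a b then [h a b] else []) ++ (t.filter (fun a' => q a' b)).map (fun a' => h a' b)) := by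
      apply pvFlatMap_perm_congr
      intro b _
      split_ifs <;> simp
    have e2 := pvFlatMap_append_perm l2 (fun b => if q a b then [h a b] else []) (fun b => (t.filter (fun a' => q a' b)).map (fun a' => h a' b))
    have e3 := pvFlatMap_ite_singleton l2 (fun b => q a b) (fun b => h a b)
    have last : (l2.flatMap (fun b => if q a b then [h a b] else []) ++
        l2.flatMap (fun b => (t.filter (fun a' => q a' b)).map (fun a' => h a' b))).Perm
        ((l2.filter (fun b => q a b)).map (fun b => h a b) ++
         t.flatMap (fun a => (l2.filter (fun b => q a b)).map (fun b => h a b))) := by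
      rw [e3]; exact List.Perm.append_left _ ih.symm
    exact (e1.trans (e2.trans last)).symm

theorem pvEntities_perm (tl : List Char) (skills : List String) :
    (skills.flatMap fun sk =>
        ((List.range (tl.length + 1)).filter (fun p => pvPred tl p sk)).map (fun p => pvEnt p sk)).Perm
      (pvES tl skills) := by
  have h1 := pvTranspose_perm skills (List.range (tl.length + 1)) (fun sk p => pvPred tl p sk) (fun sk p => pvEnt p sk)
  refine h1.trans ?_
  apply pvFlatMap_perm_congr
  intro p _
  exact (((PySem.List.sorted_perm skills (fun sk => sk.toList.length) false).filter (pvPred tl p)).map (pvEnt p)).symm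

-- ---- step 3: sorting the match list yields exactly pvES ----
theorem pvInsertBy_pairwise {α : Type} (before : α → α → Bool)
    (hasym : ∀ a b, before a b = true → before b a = false)
    (htrans : ∀ a b c, before a b = true → before b c = true → before a c = true)
    (x : α) : ∀ (l : List α), l.Pairwise (fun a b => before b a = false) →
    (PySem.List.insertBy before x l).Pairwise (fun a b => before b a = false) := by
  intro l
  induction l with
  | nil => intro _; simp [PySem.List.insertBy]
  | cons y ys ih =>
    intro hl
    rw [List.pairwise_cons] at hl
    obtain ⟨hy, hys⟩ := hl
    rw [PySem.List.insertBy]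
    by_cases h : before x y = true
    · rw [if_pos h]
      refine List.pairwise_cons.mpr ⟨?_, List.pairwise_cons.mpr ⟨hy, hys⟩⟩
      intro z hz
      rcases List.mem_cons.mp hz with rfl | hz'
      · exact hasym _ _ h
      · by_contra hzx
        have hzx' : before z x = true := by
          cases hzf : before z x
          · exact absurd hzf hzx
          · rfl
        have := htrans z x y hzx' h
        rw [hy z hz'] at this
        exact Bool.false_ne_true this
    · rw [if_neg h]
      refine List.pairwise_cons.mpr ⟨?_, ih hys⟩
      intro w hw
      rcases (PySem.List.mem_insertBy before x w ys).mp hw with rfl | hw'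
      · cases hf : before w y
        · rfl
        · exact absurd hf h
      · exact hy w hw'

theorem pvFoldl_insertBy_pairwise {α : Type} (before : α → α → Bool)
    (hasym : ∀ a b, before a b = true → before b a = false)
    (htrans : ∀ a b c, before a b = true → before b c = true → before a c = true) :
    ∀ (l acc : List α), acc.Pairwise (fun a b => before b a = false) →
    (l.foldl (fun acc x => PySem.List.insertBy before x acc) acc).Pairwise (fun a b => before b a = false) := by
  intro l
  induction l with
  | nil => intro acc h; simpa using h
  | cons x t ih =>
    intro acc h
    exact ih _ (pvInsertBy_pairwise before hasym htrans x acc h)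

theorem pvSorted2_pairwise (xs : List (Int × Int × String)) :
    (PySem.List.sorted2 xs (fun t => t.1) (fun t => t.2.1)).Pairwise pvLexLe := by
  have h := pvFoldl_insertBy_pairwise
      (fun a b : Int × Int × String => decide (a.1 < b.1) || (!decide (b.1 < a.1) && decide (a.2.1 < b.2.1)))
      (by intro a b hab; simp at hab ⊢; omega)
      (by intro a b c hab hbc; simp at hab hbc ⊢; omega)
      xs [] (by simp)
  refine List.Pairwise.imp ?_ h
  intro a b hab
  simp at hab
  unfold pvLexLe
  omega

theorem pvEq_of_perm_of_pairwise {α : Type} (r : α → α → Prop) :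
    ∀ (xs ys : List α), xs.Perm ys → xs.Pairwise r → ys.Pairwise r →
    (∀ a ∈ xs, ∀ b ∈ xs, r a b → r b a → a = b) → xs = ys := by
  intro xs
  induction xs with
  | nil => intro ys h _ _ _; exact (List.Perm.nil_eq h).symm ▸ rfl
  | cons x xs' ih =>
    intro ys hperm hx hy ha
    cases ys with
    | nil => exact absurd hperm.eq_nil (by simp)
    | cons y ys' =>
      have hxy : x = y := by
        by_cases hxy : x = y
        · exact hxy
        · have hxm : x ∈ y :: ys' := hperm.subset (by simp)
          have hym : y ∈ x :: xs' := hperm.symm.subset (by simp)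
          have hx' : x ∈ ys' := by
            rcases List.mem_cons.mp hxm with h | h
            · exact absurd h hxy
            · exact h
          have hy' : y ∈ xs' := by
            rcases List.mem_cons.mp hym with h | h
            · exact absurd h.symm hxy
            · exact h
          have r1 : r x y := (List.pairwise_cons.mp hx).1 y hy'
          have r2 : r y x := (List.pairwise_cons.mp hy).1 x hx'
          exact ha x (by simp) y (by simp [hy']) r1 r2
      subst hxy
      have hperm' : xs'.Perm ys' := hperm.cons_inv
      have := ih ys' hperm' (List.pairwise_cons.mp hx).2 (List.pairwise_cons.mp hy).2
        (fun a hax b hbx => ha a (by simp [hax]) b (by simp [hbx]))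
      rw [this]

theorem pvPairwise_flatMap {α β : Type} (r : β → β → Prop) (l : List α) (f : α → List β)
    (hin : ∀ a ∈ l, (f a).Pairwise r)
    (hcross : l.Pairwise (fun a b => ∀ x ∈ f a, ∀ y ∈ f b, r x y)) :
    (l.flatMap f).Pairwise r := by
  induction l with
  | nil => simp
  | cons a t ih =>
    rw [List.pairwise_cons] at hcross
    simp only [List.flatMap_cons]
    rw [List.pairwise_append]
    refine ⟨hin a (by simp), ih (fun b hb => hin b (by simp [hb])) hcross.2, ?_⟩
    intro x hx y hy
    obtain ⟨b, hb, hyb⟩ := List.mem_flatMap.mp hy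
    exact hcross.1 b hb x hx y hyb

theorem pvMem_pvMs (tl : List Char) (skills : List String) (p : Nat) (t : Int × Int × String)
    (h : t ∈ pvMs tl skills p) : t.1 = (p : Int) ∧ t.2.2 = "SKILL" := by
  obtain ⟨sk, _, rfl⟩ := List.mem_map.mp h
  exact ⟨rfl, rfl⟩

theorem pvQ_pairwise (tl : List Char) (skills : List String) (p : Nat) :
    (pvQ tl skills p).Pairwise (fun a b => a.toList.length ≤ b.toList.length) :=
  (PySem.List.sorted_pairwise skills (fun sk => sk.toList.length)).filter _

theorem pvES_pairwise (tl : List Char) (skills : List String) :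
    (pvES tl skills).Pairwise pvLexLe := by
  refine pvPairwise_flatMap pvLexLe _ _ ?_ ?_
  · intro p _
    unfold pvMs
    rw [List.pairwise_map]
    refine (pvQ_pairwise tl skills p).imp ?_
    intro a b hab
    unfold pvEnt pvLexLe
    right
    refine ⟨rfl, ?_⟩
    dsimp only; omega
  · refine List.pairwise_lt_range.imp ?_
    intro p p' hpp x hx y hy
    left
    rw [(pvMem_pvMs _ _ _ _ hx).1, (pvMem_pvMs _ _ _ _ hy).1]
    exact_mod_cast hpp

theorem pvSorted2_entities (tl : List Char) (skills : List String) (E : List (Int × Int × String))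
    (hperm : E.Perm (pvES tl skills)) (hlab : ∀ t ∈ E, t.2.2 = "SKILL") :
    PySem.List.sorted2 E (fun t => t.1) (fun t => t.2.1) = pvES tl skills := by
  apply pvEq_of_perm_of_pairwise pvLexLe
  · exact (PySem.List.sorted2_perm E _ _ false).trans hperm
  · exact pvSorted2_pairwise E
  · exact pvES_pairwise tl skills
  · intro a ha b hb hab hba
    have ha' : a ∈ E := (PySem.List.sorted2_perm E _ _ false).subset ha
    have hb' : b ∈ E := (PySem.List.sorted2_perm E _ _ false).subset hb
    obtain ⟨a1, a2, a3⟩ := a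
    obtain ⟨b1, b2, b3⟩ := b
    have h3 : a3 = b3 := (hlab _ ha').trans (hlab _ hb').symm
    unfold pvLexLe at hab hba
    simp only at hab hba
    have h1 : a1 = b1 := by omega
    have h2 : a2 = b2 := by omega
    rw [h1, h2, h3]

-- ---- step 4: the greedy merge over pvES is B's scan ----
theorem pvGreedy_skip (l : List (Int × Int × String)) (st : List (Int × Int × String) × Int)
    (h : ∀ t ∈ l, t.1 < st.2) : l.foldl pvStepA st = st := by
  induction l generalizing st with
  | nil => rfl
  | cons t l' ih =>
    have ht := h t (by simp)
    rw [List.foldl_cons, show pvStepA st t = st from by unfold pvStepA; rw [if_neg (by omega)]]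
    exact ih st (fun u hu => h u (by simp [hu]))

-- greedy merge of a length-sorted, all-nonzero-length block at one position:
-- the first element is taken and covers the whole block
theorem pvGreedy_block (p : Nat) (sk0 : String) (rest : List String)
    (hq : (sk0 :: rest).Pairwise (fun a b => a.toList.length ≤ b.toList.length))
    (h00 : sk0.toList.length ≠ 0)
    (st : List (Int × Int × String) × Int) (hle : st.2 ≤ (p:Int)) :
    ((sk0 :: rest).map (pvEnt p)).foldl pvStepA st =
      (st.1 ++ [pvEnt p sk0], (p:Int) + (sk0.toList.length : Int)) := by
  rw [List.pairwise_cons] at hq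
  have hstep : pvStepA st (pvEnt p sk0) = (st.1 ++ [pvEnt p sk0], (p:Int) + (sk0.toList.length:Int)) := by
    unfold pvStepA pvEnt
    rw [if_pos (by simp; omega)]
  rw [List.map_cons, List.foldl_cons, hstep]
  rw [pvGreedy_skip _ _ ?hskip]
  case hskip =>
    intro t ht
    obtain ⟨sk2, hsk2, rfl⟩ := List.mem_map.mp ht
    have := hq.1 sk2 hsk2
    simp only [pvEnt]
    omega

-- ---- step 5: B's per-position step computes exactly the greedy block ----
theorem pvFind?_min {α : Type} (k : α → Nat) (pr : α → Bool) :
    ∀ (l : List α), l.Pairwise (fun a b => k a ≤ k b) → ∀ s, l.find? pr = some s →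
    ∀ t ∈ l, pr t = true → k s ≤ k t := by
  intro l
  induction l with
  | nil => intro _ s h; simp at h
  | cons a l' ih =>
    intro hp s h t ht hprt
    rw [List.pairwise_cons] at hp
    cases ha : pr a with
    | true =>
      simp only [List.find?_cons, ha] at h
      obtain rfl : a = s := by injection h
      rcases List.mem_cons.mp ht with rfl | ht'
      · exact le_refl _
      · exact hp.1 t ht'
    | false =>
      simp only [List.find?_cons, ha] at h
      rcases List.mem_cons.mp ht with rfl | ht'
      · rw [hprt] at ha; exact absurd ha (by simp)
      · exact ih hp.2 s h t ht' hprt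

theorem pvMem_nonempty (skills : List String) (s : List Char) :
    s ∈ pvNonempty skills ↔ (s ≠ [] ∧ ∃ sk ∈ skills, PySem.Chars.lower sk.toList = s) := by
  unfold pvNonempty
  rw [PySem.List.mem_sorted, PySem.Set.mem_ofList, List.mem_filter]
  simp [List.isEmpty_iff, and_comm]

theorem pvLower_len (l : List Char) : (PySem.Chars.lower l).length = l.length := by
  simp [PySem.Chars.lower]

theorem pvLower_ne_nil (l : List Char) (h : l.length ≠ 0) : PySem.Chars.lower l ≠ [] := by
  intro hc
  have := pvLower_len l
  rw [hc] at this
  simp at this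
  omega

theorem pvMem_pvQ (tl : List Char) (skills : List String) (p : Nat) (sk : String) :
    sk ∈ pvQ tl skills p ↔ sk ∈ skills ∧ pvPred tl p sk = true := by
  unfold pvQ
  rw [List.mem_filter, PySem.List.mem_sorted]

theorem pvPred_eq_startswith (tl : List Char) (p : Nat) (sk : String) :
    pvPred tl p sk = PySem.Chars.startswith (tl.drop p) (PySem.Chars.lower sk.toList) := rfl

theorem pvMemQ_of_nonempty_match (tl : List Char) (skills : List String) (p : Nat) (s : List Char)
    (hmem : s ∈ pvNonempty skills) (hpr : PySem.Chars.startswith (tl.drop p) s = true) :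
    ∃ sk', sk' ∈ pvQ tl skills p ∧ PySem.Chars.lower sk'.toList = s ∧ sk'.toList.length ≠ 0 := by
  obtain ⟨hne, sk', hsk', hlow⟩ := (pvMem_nonempty skills s).mp hmem
  have hpred : pvPred tl p sk' = true := by rw [pvPred_eq_startswith, hlow]; exact hpr
  refine ⟨sk', (pvMem_pvQ tl skills p sk').mpr ⟨hsk', hpred⟩, hlow, ?_⟩
  intro hc
  exact hne (by rw [← hlow, List.length_eq_zero_iff.mp hc]; simp [PySem.Chars.lower])

theorem pvFind?_none (tl : List Char) (skills : List String) (p : Nat)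
    (hq : pvQ tl skills p = []) :
    (pvNonempty skills).find? (fun s => PySem.Chars.startswith (tl.drop p) s) = none := by
  cases hf : (pvNonempty skills).find? (fun s => PySem.Chars.startswith (tl.drop p) s) with
  | none => rfl
  | some s =>
    exfalso
    obtain ⟨sk', hq', _, _⟩ := pvMemQ_of_nonempty_match tl skills p s
      (List.mem_of_find?_eq_some hf) (List.find?_some hf)
    rw [hq] at hq'
    simp at hq'

theorem pvFind?_some (tl : List Char) (skills : List String) (p : Nat) (sk0 : String) (rest : List String)
    (hq : pvQ tl skills p = sk0 :: rest) (h00 : sk0.toList.length ≠ 0) :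
    ∃ s, (pvNonempty skills).find? (fun s => PySem.Chars.startswith (tl.drop p) s) = some s ∧
      s.length = sk0.toList.length := by
  have hmin0 : ∀ sk' ∈ sk0 :: rest, sk0.toList.length ≤ sk'.toList.length := by
    intro sk' hsk'
    have hpair : (sk0 :: rest).Pairwise (fun a b => a.toList.length ≤ b.toList.length) := by
      rw [← hq]; exact pvQ_pairwise tl skills p
    rcases List.mem_cons.mp hsk' with rfl | h
    · exact le_refl _
    · exact (List.pairwise_cons.mp hpair).1 sk' h
  have hsub : sk0 ∈ pvQ tl skills p := by rw [hq]; simp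
  have hpred : pvPred tl p sk0 = true := ((pvMem_pvQ tl skills p sk0).mp hsub).2
  have hskmem : sk0 ∈ skills := ((pvMem_pvQ tl skills p sk0).mp hsub).1
  have hlmem : PySem.Chars.lower sk0.toList ∈ pvNonempty skills :=
    (pvMem_nonempty skills _).mpr ⟨pvLower_ne_nil _ h00, sk0, hskmem, rfl⟩
  have hlpr : PySem.Chars.startswith (tl.drop p) (PySem.Chars.lower sk0.toList) = true := by
    rw [← pvPred_eq_startswith]; exact hpred
  obtain ⟨s, hf⟩ : ∃ s, (pvNonempty skills).find? (fun s => PySem.Chars.startswith (tl.drop p) s) = some s := by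
    have := List.find?_isSome.mpr ⟨_, hlmem, hlpr⟩
    exact Option.isSome_iff_exists.mp this
  refine ⟨s, hf, ?_⟩
  have hpair : (pvNonempty skills).Pairwise (fun a b => a.length ≤ b.length) := by
    unfold pvNonempty
    exact PySem.List.sorted_pairwise _ _
  have hle1 : s.length ≤ (PySem.Chars.lower sk0.toList).length :=
    pvFind?_min List.length _ _ hpair s hf _ hlmem hlpr
  rw [pvLower_len] at hle1
  obtain ⟨sk', hq', hlow, _⟩ := pvMemQ_of_nonempty_match tl skills p s
    (List.mem_of_find?_eq_some hf) (List.find?_some hf)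
  rw [hq] at hq'
  have hle2 : sk0.toList.length ≤ sk'.toList.length := hmin0 sk' hq'
  have hlen : s.length = sk'.toList.length := by rw [← hlow, pvLower_len]
  omega

theorem pvQ_nonzero (tl : List Char) (skills : List String) (p : Nat)
    (hne : ∀ sk ∈ skills, sk.toList.length ≠ 0) :
    ∀ sk ∈ pvQ tl skills p, sk.toList.length ≠ 0 := by
  intro sk hsk
  exact hne sk ((pvMem_pvQ tl skills p sk).mp hsk).1

theorem pvStepB_eq (tl : List Char) (skills : List String)
    (hne : ∀ sk ∈ skills, sk.toList.length ≠ 0) (p : Nat) (st : List (Int × Int × String) × Int) :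
    (pvMs tl skills p).foldl pvStepA st = pvStepB tl skills st p := by
  unfold pvStepB pvMs
  by_cases hlt : (p:Int) < st.2
  · rw [if_pos hlt]
    apply pvGreedy_skip
    intro t ht
    obtain ⟨sk, _, rfl⟩ := List.mem_map.mp ht
    show (p:Int) < st.2
    exact hlt
  · rw [if_neg hlt]
    cases hq : pvQ tl skills p with
    | nil => rw [pvFind?_none tl skills p hq]; rfl
    | cons sk0 rest =>
      have h00 : sk0.toList.length ≠ 0 := pvQ_nonzero tl skills p hne sk0 (by rw [hq]; simp)
      obtain ⟨s, hf, hlen⟩ := pvFind?_some tl skills p sk0 rest hq h00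
      rw [hf, pvGreedy_block p sk0 rest (by rw [← hq]; exact pvQ_pairwise tl skills p) h00 st (by omega)]
      unfold pvEnt
      rw [← hlen]

theorem pvQ_at_end (tl : List Char) (skills : List String)
    (hne : ∀ sk ∈ skills, sk.toList.length ≠ 0) :
    pvQ tl skills tl.length = [] := by
  unfold pvQ
  rw [List.filter_eq_nil_iff]
  intro sk hsk hpred
  have hmem : sk ∈ skills := by rwa [PySem.List.mem_sorted] at hsk
  unfold pvPred at hpred
  rw [List.drop_eq_nil_of_le (le_refl _), List.isPrefixOf_iff_prefix] at hpred
  exact pvLower_ne_nil sk.toList (hne sk hmem) (List.prefix_nil.mp hpred)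

-- ---- step 6: fold fusion, init relaxation and final assembly ----
theorem pvFoldl_flatMap {α β γ : Type} (l : List α) (g : α → List β) (f : γ → β → γ) (init : γ) :
    (l.flatMap g).foldl f init = l.foldl (fun st a => (g a).foldl f st) init := by
  induction l generalizing init with
  | nil => rfl
  | cons a t ih => simp only [List.flatMap_cons, List.foldl_append, List.foldl_cons, ih]

-- B starts with last_end = 0 while A's merge starts with last_end = -1; any two
-- non-positive starting values give the same output list
theorem pvFoldB_init (tl : List Char) (skills : List String) :
    ∀ (l : List Nat) (acc : List (Int × Int × String)) (e1 e2 : Int), e1 ≤ 0 → e2 ≤ 0 →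
    (l.foldl (pvStepB tl skills) (acc, e1)).1 = (l.foldl (pvStepB tl skills) (acc, e2)).1 := by
  intro l
  induction l with
  | nil => intro acc e1 e2 _ _; rfl
  | cons i t ih =>
    intro acc e1 e2 h1 h2
    rw [List.foldl_cons, List.foldl_cons]
    have hs1 : ¬ ((i:Int) < e1) := by omega
    have hs2 : ¬ ((i:Int) < e2) := by omega
    unfold pvStepB
    rw [if_neg hs1, if_neg hs2]
    cases hf : (pvNonempty skills).find? (fun p => PySem.Chars.startswith (tl.drop i) p) with
    | some p => rfl
    | none => exact ih acc e1 e2 h1 h2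

theorem pvNe_empty_len (sk : String) (h : sk ≠ "") : sk.toList.length ≠ 0 := by
  intro hc
  exact h (String.toList_eq_nil_iff.mp (List.length_eq_zero_iff.mp hc))

-- ===== VERDICT (by name: the statements are the Claim_ definitions above) =====
theorem annotate_text_spec : Claim_equal_annotate_text := by
  unfold Claim_equal_annotate_text
  intro text skills _ hpre
  unfold Spec_annotate_text
  have hne : ∀ sk ∈ skills, sk.toList.length ≠ 0 := by
    intro sk hsk
    refine pvNe_empty_len sk ?_
    intro hc
    exact hpre (by rw [← hc]; exact hsk)
  have hocc : (fun sk : String => pvSkillLoopA (PySem.Chars.lower text.toList) (PySem.Chars.lower sk.toList)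
        (sk.toList.length : Int) ((PySem.Chars.lower text.toList).length + 2)
        (PySem.Chars.find (PySem.Chars.lower text.toList) (PySem.Chars.lower sk.toList)))
      = (fun sk => ((List.range ((PySem.Chars.lower text.toList).length + 1)).filter
          (fun p => pvPred (PySem.Chars.lower text.toList) p sk)).map (fun p => pvEnt p sk)) := by
    funext sk
    have h0 : PySem.Chars.find (PySem.Chars.lower text.toList) (PySem.Chars.lower sk.toList)
        = PySem.Chars.findFrom (PySem.Chars.lower text.toList) (PySem.Chars.lower sk.toList) ((0:Nat):Int) := by
      rw [Nat.cast_zero, PySem.Chars.findFrom_zero]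
    rw [h0, pvLoopA_eq _ _ _ _ 0 (by omega) (by omega)]
    rw [Nat.sub_zero, ← List.range_eq_range']
    rfl
  have hlab : ∀ t ∈ (skills.flatMap fun sk => ((List.range ((PySem.Chars.lower text.toList).length + 1)).filter
      (fun p => pvPred (PySem.Chars.lower text.toList) p sk)).map (fun p => pvEnt p sk)), t.2.2 = "SKILL" := by
    intro t ht
    obtain ⟨sk, _, ht2⟩ := List.mem_flatMap.mp ht
    obtain ⟨p, _, rfl⟩ := List.mem_map.mp ht2
    rfl
  have hsorted := pvSorted2_entities (PySem.Chars.lower text.toList) skills _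
    (pvEntities_perm (PySem.Chars.lower text.toList) skills) hlab
  have hA : annotate_text text skills = ((pvES (PySem.Chars.lower text.toList) skills).foldl pvStepA ([], -1)).1 := by
    simp only [annotate_text]
    rw [PySem.List.foldl_append_eq_flatMap, List.nil_append, hocc, hsorted]
    rfl
  have hB : annotate_text_alt text skills =
      ((List.range ((PySem.Chars.lower text.toList).length)).foldl
        (pvStepB (PySem.Chars.lower text.toList) skills) ([], 0)).1 := rfl
  rw [hA, hB]
  unfold pvES
  rw [pvFoldl_flatMap]
  have hfun : (fun (st : List (Int × Int × String) × Int) (a : Nat) =>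
      (pvMs (PySem.Chars.lower text.toList) skills a).foldl pvStepA st)
      = pvStepB (PySem.Chars.lower text.toList) skills := by
    funext st p
    exact pvStepB_eq (PySem.Chars.lower text.toList) skills hne p st
  rw [hfun]
  rw [List.range_succ, List.foldl_append, List.foldl_cons, List.foldl_nil]
  have hlast : ∀ st, pvStepB (PySem.Chars.lower text.toList) skills st (PySem.Chars.lower text.toList).length = st := by
    intro st
    unfold pvStepB
    split_ifs with h
    · rfl
    · rw [pvFind?_none _ skills _ (pvQ_at_end _ skills hne)]
  rw [hlast]
  exact pvFoldB_init _ skills _ [] (-1) 0 (by omega) (by omega)
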